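-- pv_equiv track=rewrite | github.com/kmsong12/arc374-plangeneration | packing.py | _allocate_rooms_per_zone
-- ===== SOURCE A (Python) =====
-- from typing import Dict, List, Optional, Sequence, Tuple
--
-- def _allocate_rooms_per_zone(
--         n_total: int, n_zones: int,
--         explicit: Optional[List[int]],
--         ) -> List[int]:
--     """When ``explicit`` omitted, evenly split ``n_total``."""
--     if n_zones <= 0:
--         return []
--     if explicit and len(explicit) == n_zones and sum(explicit) > 0:
--         return [max(0, int(x)) for x in explicit]
--     nt = max(1, n_total)
--     base = nt // n_zones
--     rem = nt % n_zones
--     return [base + (1 if i < rem else 0) for i in range(n_zones)]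
-- ===== SOURCE B (Python) =====
-- def _allocate_rooms_per_zone(n_total, n_zones, explicit):
--     if n_zones <= 0:
--         return []
--     if explicit and len(explicit) == n_zones and sum(explicit) > 0:
--         return [max(0, int(x)) for x in explicit]
--     out = []
--     remaining = max(1, n_total)
--     for zones_left in range(n_zones, 0, -1):
--         take = -(-remaining // zones_left)   # ceiling division
--         out.append(take)
--         remaining -= take
--     return out
-- ===== Notes on version B (the rewrite author's own statement) =====
-- stated objective: alternative
-- what changed: Replaced the precomputed base//rem comprehension with a greedy loop that repeatedly takes the ceiling division of the remaining rooms by the remaining zones, maintaining running state instead of base/rem and an index comparison.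
import Mathlib
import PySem

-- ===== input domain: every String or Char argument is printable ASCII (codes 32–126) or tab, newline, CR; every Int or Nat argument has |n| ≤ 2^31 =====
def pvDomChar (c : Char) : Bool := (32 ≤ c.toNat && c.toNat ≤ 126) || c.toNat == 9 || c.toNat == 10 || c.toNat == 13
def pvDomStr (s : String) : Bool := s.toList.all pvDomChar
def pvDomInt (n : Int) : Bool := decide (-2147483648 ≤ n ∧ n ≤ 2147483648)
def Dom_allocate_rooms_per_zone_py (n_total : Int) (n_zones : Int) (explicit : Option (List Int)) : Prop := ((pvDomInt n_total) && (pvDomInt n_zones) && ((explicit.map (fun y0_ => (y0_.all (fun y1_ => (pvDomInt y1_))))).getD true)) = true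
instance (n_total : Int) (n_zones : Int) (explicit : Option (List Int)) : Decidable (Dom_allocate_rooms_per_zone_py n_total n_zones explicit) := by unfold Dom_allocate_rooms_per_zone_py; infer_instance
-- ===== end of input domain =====

-- B replaces A's precomputed base/rem comprehension by a greedy running ceiling-division loop (alternative decomposition, same O(n) cost).
-- ===== PORT A =====
def allocate_rooms_per_zone_py (n_total : Int) (n_zones : Int) (explicit : Option (List Int)) : List Int :=
  if n_zones ≤ 0 then []
  else
    let even : List Int :=
      let nt := max 1 n_total
      let base := PySem.Int.floordiv nt n_zones
      let rem := PySem.Int.mod nt n_zones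
      (PySem.List.pyRange 0 n_zones 1).map (fun i => base + if i < rem then 1 else 0)
    match explicit with
    | none => even
    | some xs =>
      if xs ≠ [] ∧ (xs.length : Int) = n_zones ∧ 0 < xs.sum then
        xs.map (fun x => max 0 x)
      else even

-- ===== PORT B =====
-- the loop body: zones_left counts down from n_zones to 1; take = ceil(remaining / zones_left)
def pvBLoop (remaining : Int) : Nat → List Int
  | 0 => []
  | k + 1 =>
    let take := -(PySem.Int.floordiv (-remaining) ((k : Int) + 1))
    take :: pvBLoop (remaining - take) k

def allocate_rooms_per_zone_py_alt (n_total : Int) (n_zones : Int) (explicit : Option (List Int)) : List Int :=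
  if n_zones ≤ 0 then []
  else
    match explicit with
    | none => pvBLoop (max 1 n_total) n_zones.toNat
    | some xs =>
      if xs ≠ [] ∧ (xs.length : Int) = n_zones ∧ 0 < xs.sum then
        xs.map (fun x => max 0 x)
      else pvBLoop (max 1 n_total) n_zones.toNat

-- ===== PRECONDITION & SPEC =====
def Spec_allocate_rooms_per_zone_py (n_total : Int) (n_zones : Int) (explicit : Option (List Int)) (out : List Int) : Prop := out = allocate_rooms_per_zone_py_alt n_total n_zones explicit
instance (n_total : Int) (n_zones : Int) (explicit : Option (List Int)) (out : List Int) : Decidable (Spec_allocate_rooms_per_zone_py n_total n_zones explicit out) := by unfold Spec_allocate_rooms_per_zone_py; infer_instance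

-- ===== CLAIM (what is proved, stated in full; the proofs are below) =====
def Claim_equal_allocate_rooms_per_zone_py : Prop := ∀ (n_total : Int) (n_zones : Int) (explicit : Option (List Int)), Dom_allocate_rooms_per_zone_py n_total n_zones explicit → Spec_allocate_rooms_per_zone_py n_total n_zones explicit (allocate_rooms_per_zone_py n_total n_zones explicit)

-- ===== LEMMAS AND PROOFS =====

-- the greedy ceiling-division loop produces exactly the base + (1 if i < rem else 0) distribution
theorem pvBLoop_eq (k : Nat) : ∀ (r : Int),
    pvBLoop r k = (List.range k).map
      (fun (i : Nat) => PySem.Int.floordiv r (k : Int) + if (i : Int) < PySem.Int.mod r (k : Int) then 1 else 0) := by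
  induction k with
  | zero => intro r; simp [pvBLoop]
  | succ k ih =>
    intro r
    have hn : (0 : Int) < (k : Int) + 1 := by positivity
    set n : Int := (k : Int) + 1 with hndef
    set b : Int := PySem.Int.floordiv r n with hb
    set m : Int := PySem.Int.mod r n with hm
    have hbm : b * n + m = r := PySem.Int.floordiv_mul_add_mod r n
    have hmod : m = r % n := by rw [hm, PySem.Int.mod_eq_emod_of_pos hn]
    have hm0 : 0 ≤ m := by rw [hmod]; exact Int.emod_nonneg r (by omega)
    have hmn : m < n := by rw [hmod]; exact Int.emod_lt_of_pos r hn
    have htake : -(PySem.Int.floordiv (-r) n) = b + (if 0 < m then 1 else 0) := by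
      rw [PySem.Int.neg_floordiv_neg_eq_iff_of_pos hn]
      constructor <;> split_ifs <;> nlinarith
    have hcast : ((k : Int) + 1) = ((k + 1 : Nat) : Int) := by push_cast; ring
    simp only [pvBLoop, List.range_succ_eq_map, List.map_cons, List.map_map]
    rw [← hcast, ← hndef, ← hb, ← hm, htake, ih]
    have hhead : b + (if 0 < m then 1 else 0)
        = b + (if ((0 : Nat) : Int) < m then 1 else 0) := by norm_num
    rcases Nat.eq_zero_or_pos k with hk0 | hkpos
    · subst hk0; simp
    · have hkZ : (0 : Int) < (k : Int) := by exact_mod_cast hkpos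
      -- the remaining rooms after the first take
      set r' : Int := r - (b + (if 0 < m then 1 else 0)) with hr'
      set m' : Int := if 0 < m then m - 1 else 0 with hm'
      have hr'eq : r' = b * (k : Int) + m' := by
        rw [hr', hm']; split_ifs <;> [skip; skip] <;> nlinarith [hbm]
      have hm'0 : 0 ≤ m' := by rw [hm']; split_ifs <;> omega
      have hm'k : m' < (k : Int) := by rw [hm']; split_ifs <;> omega
      have hfd : PySem.Int.floordiv r' (k : Int) = b := by
        rw [PySem.Int.floordiv_eq_iff_of_pos hkZ]
        constructor <;> nlinarith
      have hmd : PySem.Int.mod r' (k : Int) = m' := by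
        have := PySem.Int.floordiv_mul_add_mod r' (k : Int)
        rw [hfd] at this
        omega
      rw [hfd, hmd]
      refine congrArg₂ _ hhead.symm ?_
      apply List.map_congr_left
      intro i _
      have : ((i : Int) < m') ↔ ((Nat.succ i : Nat) : Int) < m := by
        rw [hm']; push_cast; split_ifs <;> omega
      simp only [Function.comp]
      rw [if_congr this rfl rfl]

-- ===== VERDICT (by name: the statement is the Claim_ definition above) =====
theorem allocate_rooms_per_zone_py_spec : Claim_equal_allocate_rooms_per_zone_py := by
  intro n_total n_zones explicit _
  unfold Spec_allocate_rooms_per_zone_py allocate_rooms_per_zone_py allocate_rooms_per_zone_py_alt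
  by_cases hz : n_zones ≤ 0
  · simp [hz]
  · have hzpos : 0 < n_zones := by omega
    have hcast : ((n_zones.toNat : Int)) = n_zones := Int.toNat_of_nonneg (by omega)
    have heven :
        (PySem.List.pyRange 0 n_zones 1).map
            (fun i => PySem.Int.floordiv (max 1 n_total) n_zones
              + if i < PySem.Int.mod (max 1 n_total) n_zones then 1 else 0)
          = pvBLoop (max 1 n_total) n_zones.toNat := by
      rw [pvBLoop_eq, PySem.List.pyRange_one, hcast]
      simp [List.map_map, Function.comp]
    cases explicit with
    | none => simp [hz, heven]
    | some xs =>
      by_cases hx : xs ≠ [] ∧ (xs.length : Int) = n_zones ∧ 0 < xs.sum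
      · simp [hz, hx]
      · simp [hz, hx, heven]
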